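-- pv_equiv track=rewrite | github.com/jasonlazar/proglang1 | ztalloc/ztalloc.py | solve
-- ===== SOURCE A (Python) =====
-- import collections
--
-- def solve(Range, Lout, Rout):
--     seen = set()
--     seen.add(Range)
--     remaining = collections.deque()
--     remaining.append(("", Range))
--     while remaining:
--         (path, sofar) = remaining.popleft()
--         for s in sofar:
--             if s < Lout or s > Rout:
--                 d = False
--                 break
--             d = True
--         if d:
--             if not(path):
--                 return "EMPTY"
--             else:
--                 return path
--         htuple = (sofar[0]//2, sofar[1]//2)
--         if htuple not in seen:
--             seen.add(htuple)
--             remaining.append((path + 'h', htuple))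
--         ttuple = ((sofar[0]*3+1, sofar[1]*3+1))
--         if (ttuple not in seen) and ttuple[1] < 1000000:
--             seen.add(ttuple)
--             remaining.append((path + 't', ttuple))
--     return "IMPOSSIBLE"
-- ===== SOURCE B (Python) =====
-- import collections
--
-- def solve(Range, Lout, Rout):
--     # Same BFS, but the queue holds bare states; each newly seen state records
--     # its predecessor and move in `parent`, and the answer is rebuilt backwards.
--     parent = {}
--     seen = set()
--     seen.add(Range)
--     q = collections.deque()
--     q.append(Range)
--     while q:
--         state = q.popleft()
--         if Lout <= state[0] <= Rout and Lout <= state[1] <= Rout: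
--             path = ""
--             cur = state
--             while cur != Range:
--                 prev, c = parent[cur]
--                 path = c + path
--                 cur = prev
--             return path if path else "EMPTY"
--         h = (state[0] // 2, state[1] // 2)
--         if h not in seen:
--             seen.add(h)
--             parent[h] = (state, 'h')
--             q.append(h)
--         t = (state[0] * 3 + 1, state[1] * 3 + 1)
--         if t not in seen and t[1] < 1000000:
--             seen.add(t)
--             parent[t] = (state, 't')
--             q.append(t)
--     return "IMPOSSIBLE"
-- ===== Notes on version B (the rewrite author's own statement) =====
-- stated objective: alternative
-- what changed: Same BFS order, but the queue holds bare states instead of (path, state) pairs: a parent map records each newly seen state's predecessor and move, and the answer path is reconstructed backwards from the accepted state, so no path strings are copied while searching.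
import Mathlib
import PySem

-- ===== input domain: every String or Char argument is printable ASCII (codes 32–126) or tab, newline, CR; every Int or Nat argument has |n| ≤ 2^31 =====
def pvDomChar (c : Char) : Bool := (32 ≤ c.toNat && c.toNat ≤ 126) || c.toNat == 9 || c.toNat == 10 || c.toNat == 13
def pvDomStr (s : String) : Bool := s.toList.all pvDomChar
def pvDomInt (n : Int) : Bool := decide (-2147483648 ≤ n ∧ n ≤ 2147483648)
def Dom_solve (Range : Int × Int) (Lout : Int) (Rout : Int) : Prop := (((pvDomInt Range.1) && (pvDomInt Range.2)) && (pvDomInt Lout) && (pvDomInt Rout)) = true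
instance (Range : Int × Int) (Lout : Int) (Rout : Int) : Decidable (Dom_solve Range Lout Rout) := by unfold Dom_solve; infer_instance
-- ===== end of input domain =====

-- B replaces A's queue of (path, state) pairs by a queue of bare states plus a predecessor map,
-- rebuilding the answer backwards at acceptance (objective: alternative decomposition, same BFS order).

-- ===== PORT A =====
-- the 'for s in sofar' loop computing d (break returns False at once)
def pvForD (Lout Rout : Int) : List Int → Bool → Bool
  | [], d => d
  | s :: rest, _ => if s < Lout ∨ s > Rout then false else pvForD Lout Rout rest true

-- the 'while remaining' loop; fuel is only a totality guard (the Python while-loop has none)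
def solveLoop (Lout Rout : Int) : Nat → PySem.Set (Int × Int) → List (String × (Int × Int)) → String
  | 0, _, _ => "IMPOSSIBLE"
  | _ + 1, _, [] => "IMPOSSIBLE"
  | fuel + 1, seen, (path, sofar) :: rest =>
    if pvForD Lout Rout [sofar.1, sofar.2] false then
      if path = "" then "EMPTY" else path
    else
      let htuple : Int × Int := (PySem.Int.floordiv sofar.1 2, PySem.Int.floordiv sofar.2 2)
      let st1 : PySem.Set (Int × Int) × List (String × (Int × Int)) :=
        if ¬ (htuple ∈ seen) then (PySem.Set.add seen htuple, rest ++ [(path ++ "h", htuple)])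
        else (seen, rest)
      let ttuple : Int × Int := (sofar.1 * 3 + 1, sofar.2 * 3 + 1)
      let st2 : PySem.Set (Int × Int) × List (String × (Int × Int)) :=
        if ¬ (ttuple ∈ st1.1) ∧ ttuple.2 < 1000000 then (PySem.Set.add st1.1 ttuple, st1.2 ++ [(path ++ "t", ttuple)])
        else st1
      solveLoop Lout Rout fuel st2.1 st2.2

def solve (Range : Int × Int) (Lout : Int) (Rout : Int) : String :=
  solveLoop Lout Rout 1099511627776 (PySem.Set.add PySem.Set.empty Range) [("", Range)]

-- ===== PORT B =====
-- the 'while cur != Range' reconstruction loop of Source B; fuel is a totality guard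
-- (the walk strictly descends through distinct keys of parent, so parent.size + 1 steps always suffice);
-- the 'none' arm is Python's KeyError, never reached from solveLoopAlt
def rebuildPath (Range : Int × Int) : Nat → PySem.Dict (Int × Int) ((Int × Int) × String) → (Int × Int) → String → String
  | 0, _, _, path => path
  | f + 1, parent, cur, path =>
    if cur = Range then path
    else
      match parent.get? cur with
      | some pc => rebuildPath Range f parent pc.1 (pc.2 ++ path)
      | none => path

-- the 'while q' loop of Source B
def solveLoopAlt (Lout Rout : Int) (Range : Int × Int) :
    Nat → PySem.Set (Int × Int) → PySem.Dict (Int × Int) ((Int × Int) × String) → List (Int × Int) → String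
  | 0, _, _, _ => "IMPOSSIBLE"
  | _ + 1, _, _, [] => "IMPOSSIBLE"
  | fuel + 1, seen, parent, state :: rest =>
    if Lout ≤ state.1 ∧ state.1 ≤ Rout ∧ Lout ≤ state.2 ∧ state.2 ≤ Rout then
      let path := rebuildPath Range (parent.size + 1) parent state ""
      if path ≠ "" then path else "EMPTY"
    else
      let h : Int × Int := (PySem.Int.floordiv state.1 2, PySem.Int.floordiv state.2 2)
      let st1 : PySem.Set (Int × Int) × PySem.Dict (Int × Int) ((Int × Int) × String) × List (Int × Int) :=
        if ¬ (h ∈ seen) then (PySem.Set.add seen h, parent.insert h (state, "h"), rest ++ [h])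
        else (seen, parent, rest)
      let t : Int × Int := (state.1 * 3 + 1, state.2 * 3 + 1)
      let st2 : PySem.Set (Int × Int) × PySem.Dict (Int × Int) ((Int × Int) × String) × List (Int × Int) :=
        if ¬ (t ∈ st1.1) ∧ t.2 < 1000000 then (PySem.Set.add st1.1 t, st1.2.1.insert t (state, "t"), st1.2.2 ++ [t])
        else st1
      solveLoopAlt Lout Rout Range fuel st2.1 st2.2.1 st2.2.2

def solve_alt (Range : Int × Int) (Lout : Int) (Rout : Int) : String :=
  solveLoopAlt Lout Rout Range 1099511627776 (PySem.Set.add PySem.Set.empty Range) PySem.Dict.empty [Range]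

-- ===== PRECONDITION & SPEC =====
def Spec_solve (Range : Int × Int) (Lout : Int) (Rout : Int) (out : String) : Prop := out = solve_alt Range Lout Rout
instance (Range : Int × Int) (Lout : Int) (Rout : Int) (out : String) : Decidable (Spec_solve Range Lout Rout out) := by unfold Spec_solve; infer_instance

-- ===== CLAIM (what is proved, stated in full; the proofs are below) =====
def Claim_equal_solve : Prop := ∀ (Range : Int × Int) (Lout : Int) (Rout : Int), Dom_solve Range Lout Rout → Spec_solve Range Lout Rout (solve Range Lout Rout)

-- ===== LEMMAS AND PROOFS =====

-- A's for-loop over the two components equals B's chained comparison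
theorem pvForD_eq (L R a b : Int) :
    pvForD L R [a, b] false = decide (L ≤ a ∧ a ≤ R ∧ L ≤ b ∧ b ≤ R) := by
  simp only [pvForD]
  split_ifs <;> simp_all <;> omega

-- parent-chain from Range to s spelling the path p; ns lists the non-root nodes (distinct, all seen)
inductive pvChain (seen : PySem.Set (Int × Int)) (parent : PySem.Dict (Int × Int) ((Int × Int) × String))
    (R : Int × Int) : (Int × Int) → String → List (Int × Int) → Prop
  | base : pvChain seen parent R R "" []
  | step (s prev : Int × Int) (c p : String) (ns : List (Int × Int)) :
      s ∈ seen → s ∉ ns → s ≠ R → c.length = 1 →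
      parent.get? s = some (prev, c) →
      pvChain seen parent R prev p ns →
      pvChain seen parent R s (p ++ c) (ns ++ [s])

theorem pvChain_mem_seen {seen parent R s p ns} (h : pvChain seen parent R s p ns) :
    ∀ x ∈ ns, x ∈ seen := by
  induction h with
  | base => simp
  | step a aprev ac ap ans hs hns hsr hc hget hch ih =>
      intro x hx
      rcases List.mem_append.1 hx with hx | hx
      · exact ih x hx
      · have hxa : x = a := by simpa using hx
        subst hxa; exact hs

theorem pvChain_grow_seen {seen parent R s p ns} (x : Int × Int)
    (h : pvChain seen parent R s p ns) : pvChain (PySem.Set.add seen x) parent R s p ns := by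
  induction h with
  | base => exact pvChain.base
  | step a aprev ac ap ans hs hns hsr hc hget hch ih =>
      exact pvChain.step a aprev ac ap ans (by rw [PySem.Set.mem_add]; exact Or.inl hs) hns hsr hc hget ih

theorem pvChain_insert {seen parent R s p ns} (k : Int × Int) (v : (Int × Int) × String)
    (hk : k ∉ seen) (h : pvChain seen parent R s p ns) :
    pvChain seen (parent.insert k v) R s p ns := by
  induction h with
  | base => exact pvChain.base
  | step a aprev ac ap ans hs hns hsr hc hget hch ih =>
      have hne : a ≠ k := fun he => hk (he ▸ hs)
      exact pvChain.step a aprev ac ap ans hs hns hsr hc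
        (by rw [PySem.Dict.get?_insert_of_ne _ _ hne]; exact hget) ih

theorem pvLift {seen parent R s p ns} (k : Int × Int) (v : (Int × Int) × String) (hk : k ∉ seen)
    (hch : pvChain seen parent R s p ns) :
    pvChain (PySem.Set.add seen k) (parent.insert k v) R s p ns :=
  pvChain_grow_seen k (pvChain_insert k v hk hch)

theorem pvNew {seen parent R s p ns} (k : Int × Int) (c : String)
    (hch : pvChain seen parent R s p ns) (hk : k ∉ seen) (hR : R ∈ seen) (hc : c.length = 1) :
    pvChain (PySem.Set.add seen k) (parent.insert k (s, c)) R k (p ++ c) (ns ++ [k]) :=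
  pvChain.step k s c p ns (by rw [PySem.Set.mem_add]; exact Or.inr rfl)
    (fun hm => hk (pvChain_mem_seen hch k hm))
    (fun he => hk (he ▸ hR)) hc (by rw [PySem.Dict.get?_insert_self])
    (pvLift k (s, c) hk hch)

theorem pvChain_nodup_keys {seen parent R s p ns} (h : pvChain seen parent R s p ns) :
    ns.Nodup ∧ ∀ x ∈ ns, x ∈ parent.keys := by
  induction h with
  | base => exact ⟨List.nodup_nil, by simp⟩
  | step a aprev ac ap ans hs hns hsr hc hget hch ih =>
      constructor
      · exact ih.1.append (List.nodup_singleton a) (by simpa using hns)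
      · intro x hx
        rcases List.mem_append.1 hx with hx | hx
        · exact ih.2 x hx
        · have hxa : x = a := by simpa using hx
          subst hxa
          have hne : parent.get? x ≠ none := by rw [hget]; simp
          rw [Ne, PySem.Dict.get?_eq_none_iff_not_mem_keys, not_not] at hne
          exact hne

theorem pvChain_len_le {seen parent R s p ns} (h : pvChain seen parent R s p ns) :
    ns.length ≤ parent.size := by
  obtain ⟨hnd, hsub⟩ := pvChain_nodup_keys h
  have := (hnd.subperm (fun x hx => hsub x hx)).length_le
  simpa [PySem.Dict.keys, PySem.Dict.size] using this

theorem pvChain_rebuild {seen parent R s p ns} (h : pvChain seen parent R s p ns) :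
    ∀ (f : Nat) (acc : String), ns.length ≤ f → rebuildPath R f parent s acc = p ++ acc := by
  induction h with
  | base =>
      intro f acc _
      cases f with
      | zero => simp [rebuildPath]
      | succ f => simp [rebuildPath]
  | step a aprev ac ap ans hs hns hsr hc hget hch ih =>
      intro f acc hf
      cases f with
      | zero => simp at hf
      | succ f =>
          simp only [rebuildPath, if_neg hsr, hget]
          rw [ih f (ac ++ acc) (by simpa using Nat.lt_succ_iff.1 (by simpa using hf)),
              String.append_assoc]

theorem pvChain_empty_iff {seen parent R s p ns} (h : pvChain seen parent R s p ns) :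
    (p = "") = (s = R) := by
  cases h with
  | base => simp
  | step a aprev ac ap ans hs hns hsr hc hget hch =>
      have hl : (ap ++ ac).length = ap.length + 1 := by rw [String.length_append, hc]
      have hne : ap ++ ac ≠ "" := fun he => by simp [he] at hl
      simp [hne, hsr]

-- the BFS loops agree: every queued (path, state) of A is the rebuilt path of its state in B
theorem loop_eq (Lout Rout : Int) (R : Int × Int) :
    ∀ (fuel : Nat) (seen : PySem.Set (Int × Int)) (parent : PySem.Dict (Int × Int) ((Int × Int) × String))
      (qA : List (String × (Int × Int))),
      R ∈ seen →
      (∀ p s, (p, s) ∈ qA → ∃ ns, pvChain seen parent R s p ns) →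
      solveLoop Lout Rout fuel seen qA = solveLoopAlt Lout Rout R fuel seen parent (qA.map Prod.snd) := by
  intro fuel
  induction fuel with
  | zero => intro seen parent qA _ _; rfl
  | succ fuel ih =>
      intro seen parent qA hR hq
      match qA with
      | [] => rfl
      | (p, s) :: rest =>
          obtain ⟨ns, hch⟩ := hq p s (List.mem_cons_self ..)
          simp only [List.map_cons, solveLoop, solveLoopAlt, pvForD_eq]
          by_cases hacc : Lout ≤ s.1 ∧ s.1 ≤ Rout ∧ Lout ≤ s.2 ∧ s.2 ≤ Rout
          · rw [if_pos (by simpa using hacc), if_pos hacc]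
            have hrb : rebuildPath R (parent.size + 1) parent s "" = p := by
              rw [pvChain_rebuild hch (parent.size + 1) ""
                    (Nat.le_succ_of_le (pvChain_len_le hch)), String.append_empty]
            have hemp := pvChain_empty_iff hch
            by_cases hp : p = ""
            · simp [hrb, hp]
            · simp [hrb, hp]
          · rw [if_neg (by simpa using hacc), if_neg hacc]
            set hT : Int × Int := (PySem.Int.floordiv s.1 2, PySem.Int.floordiv s.2 2) with hhT
            set tT : Int × Int := ((s.1 * 3 + 1 : Int), (s.2 * 3 + 1 : Int)) with htT
            by_cases hmh : hT ∈ seen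
            · rw [if_neg (not_not_intro hmh), if_neg (not_not_intro hmh)]
              dsimp only
              by_cases hmt : tT ∉ seen ∧ s.2 * 3 + 1 < 1000000
              · rw [if_pos hmt, if_pos hmt]
                dsimp only
                have h1 : R ∈ PySem.Set.add seen tT := by rw [PySem.Set.mem_add]; exact Or.inl hR
                have h2 : ∀ q u, (q, u) ∈ rest ++ [(p ++ "t", tT)] →
                    ∃ ns', pvChain (PySem.Set.add seen tT) (parent.insert tT (s, "t")) R u q ns' := by
                  intro q u hm
                  rcases List.mem_append.1 hm with hm | hm
                  · obtain ⟨ns', hc'⟩ := hq q u (List.mem_cons_of_mem _ hm)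
                    exact ⟨ns', pvLift tT (s, "t") hmt.1 hc'⟩
                  · have hqu : q = p ++ "t" ∧ u = tT := by simpa using hm
                    obtain ⟨hq1, hq2⟩ := hqu; subst hq1; subst hq2
                    exact ⟨ns ++ [tT], pvNew tT "t" hch hmt.1 hR rfl⟩
                simpa using ih _ _ _ h1 h2
              · rw [if_neg hmt, if_neg hmt]
                dsimp only
                exact ih _ _ _ hR (fun q u hm => hq q u (List.mem_cons_of_mem _ hm))
            · rw [if_pos hmh, if_pos hmh]
              dsimp only
              have hRh : R ∈ PySem.Set.add seen hT := by rw [PySem.Set.mem_add]; exact Or.inl hR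
              by_cases hmt : tT ∉ PySem.Set.add seen hT ∧ s.2 * 3 + 1 < 1000000
              · rw [if_pos hmt, if_pos hmt]
                dsimp only
                have h1 : R ∈ PySem.Set.add (PySem.Set.add seen hT) tT := by
                  rw [PySem.Set.mem_add]; exact Or.inl hRh
                have h2 : ∀ q u, (q, u) ∈ (rest ++ [(p ++ "h", hT)]) ++ [(p ++ "t", tT)] →
                    ∃ ns', pvChain (PySem.Set.add (PySem.Set.add seen hT) tT)
                      ((parent.insert hT (s, "h")).insert tT (s, "t")) R u q ns' := by
                  intro q u hm
                  rcases List.mem_append.1 hm with hm | hm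
                  · rcases List.mem_append.1 hm with hm | hm
                    · obtain ⟨ns', hc'⟩ := hq q u (List.mem_cons_of_mem _ hm)
                      exact ⟨ns', pvLift tT (s, "t") hmt.1 (pvLift hT (s, "h") hmh hc')⟩
                    · have hqu : q = p ++ "h" ∧ u = hT := by simpa using hm
                      obtain ⟨hq1, hq2⟩ := hqu; subst hq1; subst hq2
                      exact ⟨ns ++ [hT], pvLift tT (s, "t") hmt.1 (pvNew hT "h" hch hmh hR rfl)⟩
                  · have hqu : q = p ++ "t" ∧ u = tT := by simpa using hm
                    obtain ⟨hq1, hq2⟩ := hqu; subst hq1; subst hq2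
                    exact ⟨ns ++ [tT], pvNew tT "t" (pvLift hT (s, "h") hmh hch) hmt.1 hRh rfl⟩
                simpa using ih _ _ _ h1 h2
              · rw [if_neg hmt, if_neg hmt]
                dsimp only
                have h2 : ∀ q u, (q, u) ∈ rest ++ [(p ++ "h", hT)] →
                    ∃ ns', pvChain (PySem.Set.add seen hT) (parent.insert hT (s, "h")) R u q ns' := by
                  intro q u hm
                  rcases List.mem_append.1 hm with hm | hm
                  · obtain ⟨ns', hc'⟩ := hq q u (List.mem_cons_of_mem _ hm)
                    exact ⟨ns', pvLift hT (s, "h") hmh hc'⟩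
                  · have hqu : q = p ++ "h" ∧ u = hT := by simpa using hm
                    obtain ⟨hq1, hq2⟩ := hqu; subst hq1; subst hq2
                    exact ⟨ns ++ [hT], pvNew hT "h" hch hmh hR rfl⟩
                simpa using ih _ _ _ hRh h2

-- ===== VERDICT (by name: the statement is the Claim_ definition above) =====
theorem solve_spec : Claim_equal_solve := by
  intro Range Lout Rout _
  unfold Spec_solve solve solve_alt
  refine loop_eq Lout Rout Range _ _ _ _ ?_ ?_
  · simp
  · intro p s hm
    simp at hm
    obtain ⟨hp, hs⟩ := hm
    subst hp; subst hs
    exact ⟨[], pvChain.base⟩
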